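-- pv_equiv track=rewrite | github.com/chen378/family_network | utils/micro_reader.py | process_protocol
-- ===== SOURCE A (Python) =====
-- def process_protocol(row):
--     list = row.split(' ')
--     Relay = ''
--     FlowCtrl = ''
--     HSDir = ''
--     HSIntro = ''
--     for l in list:
--         if l.startswith('Relay'):
--             Relay = l.split('=')[1]
--         elif l.startswith('FlowCtrl'):
--             FlowCtrl = l.split('=')[1]
--         elif l.startswith('HSDir'):
--             HSDir = l.split('=')[1]
--         elif l.startswith('HSIntro'):
--             HSIntro = l.split('=')[1]
--     return Relay + ' ' + FlowCtrl + ' ' + HSDir + ' ' + HSIntro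
-- ===== SOURCE B (Python) =====
-- def process_protocol(row):
--     tokens = row.split(' ')
--
--     def get_field(prefix):
--         value = ''
--         for l in tokens:
--             if l.startswith(prefix):
--                 value = l.split('=')[1]
--         return value
--
--     return ' '.join(get_field(p) for p in ('Relay', 'FlowCtrl', 'HSDir', 'HSIntro'))
-- ===== Notes on version B (the rewrite author's own statement) =====
-- stated objective: alternative
-- what changed: Replaces the single pass that threads four accumulators through an if/elif chain by a helper get_field(prefix) that scans the tokens per prefix for the last match, joined with ' '.join; equivalent because the four prefixes are mutually non-overlapping.
import Mathlib
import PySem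

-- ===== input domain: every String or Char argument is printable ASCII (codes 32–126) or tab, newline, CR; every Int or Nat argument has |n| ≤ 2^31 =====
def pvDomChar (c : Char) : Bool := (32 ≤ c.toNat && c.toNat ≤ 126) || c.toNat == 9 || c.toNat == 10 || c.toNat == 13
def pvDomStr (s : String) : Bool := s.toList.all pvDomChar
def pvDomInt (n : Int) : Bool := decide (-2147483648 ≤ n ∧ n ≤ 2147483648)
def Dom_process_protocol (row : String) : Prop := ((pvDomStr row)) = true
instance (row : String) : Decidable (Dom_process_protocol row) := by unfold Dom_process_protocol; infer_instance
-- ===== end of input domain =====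

-- B replaces A's single if/elif pass carrying four accumulators by a per-prefix helper scan
-- (last matching token), joined with ' '; same cost, different decomposition.

def pvR : List Char := "Relay".toList
def pvF : List Char := "FlowCtrl".toList
def pvD : List Char := "HSDir".toList
def pvI : List Char := "HSIntro".toList

-- l.split('=')[1]; Python raises IndexError when index 1 is absent (those rows are outside Pre_)
def pvVal (l : List Char) : List Char := (PySem.List.pyGet? (PySem.Chars.splitOn l ['=']) 1).getD []

-- ===== PORT A =====
def pvStepA (st : List Char × List Char × List Char × List Char) (l : List Char) :
    List Char × List Char × List Char × List Char :=
  if PySem.Chars.startswith l pvR then (pvVal l, st.2.1, st.2.2.1, st.2.2.2)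
  else if PySem.Chars.startswith l pvF then (st.1, pvVal l, st.2.2.1, st.2.2.2)
  else if PySem.Chars.startswith l pvD then (st.1, st.2.1, pvVal l, st.2.2.2)
  else if PySem.Chars.startswith l pvI then (st.1, st.2.1, st.2.2.1, pvVal l)
  else st

def process_protocol (row : String) : String :=
  let st := (PySem.Chars.splitOn row.toList [' ']).foldl pvStepA ([], [], [], [])
  String.ofList (st.1 ++ [' '] ++ st.2.1 ++ [' '] ++ st.2.2.1 ++ [' '] ++ st.2.2.2)

-- ===== PORT B =====
-- get_field(prefix): value of the last token starting with prefix, default ''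
def pvGetField (tokens : List (List Char)) (pfx : List Char) : List Char :=
  tokens.foldl (fun v l => if PySem.Chars.startswith l pfx then pvVal l else v) []

def process_protocol_alt (row : String) : String :=
  let tokens := PySem.Chars.splitOn row.toList [' ']
  String.ofList (PySem.Chars.join [' ']
    ([pvR, pvF, pvD, pvI].map (pvGetField tokens)))

-- ===== PRECONDITION & SPEC =====
-- Pre_ excludes rows containing a token that starts with one of the four prefixes but has no '='
-- (there Python A raises IndexError on l.split('=')[1]; B raises identically).
def Pre_process_protocol (row : String) : Prop :=
  ∀ l ∈ PySem.Chars.splitOn row.toList [' '],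
    (PySem.Chars.startswith l pvR || PySem.Chars.startswith l pvF ||
     PySem.Chars.startswith l pvD || PySem.Chars.startswith l pvI) = true →
    1 < (PySem.Chars.splitOn l ['=']).length
instance (row : String) : Decidable (Pre_process_protocol row) := by
  unfold Pre_process_protocol; infer_instance
def pvWitness_process_protocol : String := "Relay=1 FlowCtrl=2 HSDir= x"

def Spec_process_protocol (row : String) (out : String) : Prop := out = process_protocol_alt row
instance (row : String) (out : String) : Decidable (Spec_process_protocol row out) := by
  unfold Spec_process_protocol; infer_instance

-- ===== CLAIM (what is proved, stated in full; the proofs are below) =====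
def Claim_equal_process_protocol : Prop :=
  ∀ (row : String), Dom_process_protocol row → Pre_process_protocol row →
    Spec_process_protocol row (process_protocol row)

-- ===== LEMMAS AND PROOFS =====

-- two words neither of which is a prefix of the other cannot both be prefixes of l
theorem pv_sw_excl (l p q : List Char) (h1 : ¬ (p <+: q)) (h2 : ¬ (q <+: p))
    (hp : PySem.Chars.startswith l p = true) : PySem.Chars.startswith l q = false := by
  by_contra h
  have hq : PySem.Chars.startswith l q = true := by
    cases hvq : PySem.Chars.startswith l q with
    | false => exact absurd hvq h
    | true => rfl
  rw [PySem.Chars.startswith_iff] at hp hq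
  rcases List.prefix_or_prefix_of_prefix hp hq with h' | h'
  · exact h1 h'
  · exact h2 h'

-- A's one-pass fold over the if/elif step equals four independent per-prefix scans
theorem pv_fold_eq (ts : List (List Char)) (r f d i : List Char) :
    ts.foldl pvStepA (r, f, d, i) =
      (ts.foldl (fun v l => if PySem.Chars.startswith l pvR then pvVal l else v) r,
       ts.foldl (fun v l => if PySem.Chars.startswith l pvF then pvVal l else v) f,
       ts.foldl (fun v l => if PySem.Chars.startswith l pvD then pvVal l else v) d,
       ts.foldl (fun v l => if PySem.Chars.startswith l pvI then pvVal l else v) i) := by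
  induction ts generalizing r f d i with
  | nil => rfl
  | cons l ts ih =>
    simp only [List.foldl_cons]
    by_cases hR : PySem.Chars.startswith l pvR = true
    · have hF := pv_sw_excl l pvR pvF (by decide) (by decide) hR
      have hD := pv_sw_excl l pvR pvD (by decide) (by decide) hR
      have hI := pv_sw_excl l pvR pvI (by decide) (by decide) hR
      simp [pvStepA, hR, hF, hD, hI, ih]
    · by_cases hF : PySem.Chars.startswith l pvF = true
      · have hD := pv_sw_excl l pvF pvD (by decide) (by decide) hF
        have hI := pv_sw_excl l pvF pvI (by decide) (by decide) hF
        simp [pvStepA, hR, hF, hD, hI, ih]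
      · by_cases hD : PySem.Chars.startswith l pvD = true
        · have hI := pv_sw_excl l pvD pvI (by decide) (by decide) hD
          simp [pvStepA, hR, hF, hD, hI, ih]
        · by_cases hI : PySem.Chars.startswith l pvI = true
          · simp [pvStepA, hR, hF, hD, hI, ih]
          · simp [pvStepA, hR, hF, hD, hI, ih]

-- ===== VERDICT (by name: the statement is the Claim_ definition above) =====
theorem process_protocol_spec : Claim_equal_process_protocol := by
  intro row _ _
  unfold Spec_process_protocol process_protocol process_protocol_alt pvGetField
  simp only [pv_fold_eq, List.map]
  apply congrArg
  simp [PySem.Chars.join, List.intercalate, List.intersperse]
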